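-- pv_equiv track=rewrite | github.com/amadousysada/image-segmentation | robust_model_loader.py | find_model_file
-- ===== SOURCE A (Python) =====
-- def find_model_file(base_path, all_files):
--     """Find the best model file from available files"""
--
--     # Priority order for different file types
--     model_patterns = [
--         ('.keras', ['model.keras', 'saved_model.keras']),
--         ('.h5', ['model.h5', 'weights.h5']),
--         ('.pb', ['saved_model.pb']),
--     ]
--
--     for extension, preferred_names in model_patterns:
--         # First, look for preferred names
--         for name in preferred_names:
--             for file_path in all_files:
--                 if file_path.endswith(name):
--                     return file_path
--
--         # Then look for any file with the extension
--         for file_path in all_files: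
--             if file_path.endswith(extension):
--                 return file_path
--
--     return None
-- ===== SOURCE B (Python) =====
-- # Flat priority list: for each (ext, names) group, preferred names first, then the extension.
-- MATCHERS = ['model.keras', 'saved_model.keras', '.keras',
--             'model.h5', 'weights.h5', '.h5',
--             'saved_model.pb', '.pb']
--
-- def find_model_file(base_path, all_files):
--     """Find the best model file from available files (single pass + priority key)."""
--     best = None  # (matcher_index, file_path)
--     for f in all_files:
--         k = next((i for i, m in enumerate(MATCHERS) if f.endswith(m)), None)
--         if k is None:
--             continue
--         if best is None or k < best[0]:
--             best = (k, f)
--     return None if best is None else best[1]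
-- ===== Notes on version B (the rewrite author's own statement) =====
-- stated objective: alternative
-- what changed: Replaces the eight repeated full scans of all_files (one per pattern/name, first hit returns) with a single pass that assigns each file the index of the first suffix matcher it matches and keeps the best (smallest key, earliest file).
import Mathlib
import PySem

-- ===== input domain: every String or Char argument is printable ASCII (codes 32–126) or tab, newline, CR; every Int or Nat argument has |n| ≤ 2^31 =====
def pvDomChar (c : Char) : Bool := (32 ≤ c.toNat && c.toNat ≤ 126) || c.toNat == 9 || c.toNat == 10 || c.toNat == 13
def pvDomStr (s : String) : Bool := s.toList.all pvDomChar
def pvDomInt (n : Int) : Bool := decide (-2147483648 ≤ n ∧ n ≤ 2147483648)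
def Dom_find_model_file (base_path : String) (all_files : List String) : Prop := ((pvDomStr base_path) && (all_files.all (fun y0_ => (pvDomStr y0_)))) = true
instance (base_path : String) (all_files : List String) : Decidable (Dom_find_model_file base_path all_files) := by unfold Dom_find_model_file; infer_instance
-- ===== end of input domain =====

-- B replaces A's repeated full scans (one per pattern) by a single pass over the files
-- keeping the best (matcher-index, file) pair; same return value, alternative structure.


-- ===== PORT A =====
-- A's inner loop "for name in preferred_names: for file_path in all_files: …"
def scanNames (all_files : List String) : List String → Option String
  | [] => none
  | name :: rest =>
    match all_files.find? (fun fp => PySem.Str.endswith fp name) with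
    | some fp => some fp
    | none => scanNames all_files rest

-- A's outer loop over model_patterns
def scanPatterns (all_files : List String) : List (String × List String) → Option String
  | [] => none
  | (extension, preferred_names) :: rest =>
    match scanNames all_files preferred_names with
    | some fp => some fp
    | none =>
      match all_files.find? (fun fp => PySem.Str.endswith fp extension) with
      | some fp => some fp
      | none => scanPatterns all_files rest

def find_model_file (base_path : String) (all_files : List String) : Option String :=
  scanPatterns all_files
    [(".keras", ["model.keras", "saved_model.keras"]),
     (".h5", ["model.h5", "weights.h5"]),
     (".pb", ["saved_model.pb"])]

-- ===== PORT B =====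
def pvMatchers : List String :=
  ["model.keras", "saved_model.keras", ".keras",
   "model.h5", "weights.h5", ".h5",
   "saved_model.pb", ".pb"]

-- one iteration of B's loop body
def stepB (ms : List String) (best : Option (Nat × String)) (f : String) : Option (Nat × String) :=
  match ms.findIdx? (fun m => PySem.Str.endswith f m) with
  | none => best
  | some k =>
    match best with
    | none => some (k, f)
    | some (bk, _) => if k < bk then some (k, f) else best

-- B's "for f in all_files" loop
def loopB (ms : List String) (best : Option (Nat × String)) : List String → Option (Nat × String)
  | [] => best
  | f :: fs => loopB ms (stepB ms best f) fs

def find_model_file_alt (base_path : String) (all_files : List String) : Option String :=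
  match loopB pvMatchers none all_files with
  | none => none
  | some (_, f) => some f

-- ===== PRECONDITION & SPEC =====
def Spec_find_model_file (base_path : String) (all_files : List String) (out : Option String) : Prop := out = find_model_file_alt base_path all_files
instance (base_path : String) (all_files : List String) (out : Option String) : Decidable (Spec_find_model_file base_path all_files out) := by unfold Spec_find_model_file; infer_instance

-- ===== CLAIM (what is proved, stated in full; the proofs are below) =====
def Claim_equal_find_model_file : Prop := ∀ (base_path : String) (all_files : List String), Dom_find_model_file base_path all_files → Spec_find_model_file base_path all_files (find_model_file base_path all_files)

-- ===== LEMMAS AND PROOFS =====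

-- proof-side view of A: one flat scan list, one full find? per matcher
def loopA (all_files : List String) : List String → Option String
  | [] => none
  | m :: ms =>
    match all_files.find? (fun fp => PySem.Str.endswith fp m) with
    | some fp => some fp
    | none => loopA all_files ms

theorem scanNames_eq_loopA (fs : List String) (ns : List String) :
    scanNames fs ns = loopA fs ns := by
  induction ns with
  | nil => rfl
  | cons n ns ih =>
    simp only [scanNames, loopA, ih]

theorem loopA_append (fs xs ys : List String) :
    loopA fs (xs ++ ys) =
      match loopA fs xs with
      | some f => some f
      | none => loopA fs ys := by
  induction xs with
  | nil => rfl
  | cons x xs ih =>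
    simp only [List.cons_append, loopA, ih]
    cases fs.find? (fun fp => PySem.Str.endswith fp x) <;> rfl

theorem scanPatterns_eq_loopA (fs : List String) (pats : List (String × List String)) :
    scanPatterns fs pats = loopA fs (pats.flatMap (fun p => p.2 ++ [p.1])) := by
  induction pats with
  | nil => rfl
  | cons p pats ih =>
    obtain ⟨ext, ns⟩ := p
    simp only [scanPatterns, List.flatMap_cons, loopA_append, scanNames_eq_loopA, ih]
    cases loopA fs ns with
    | some f => rfl
    | none =>
      simp only [loopA]
      cases fs.find? (fun fp => PySem.Str.endswith fp ext) <;> rfl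

-- once best has key 0 it never changes
theorem loopB_zero (ms : List String) (f0 : String) (fs : List String) :
    loopB ms (some (0, f0)) fs = some (0, f0) := by
  induction fs with
  | nil => rfl
  | cons f fs ih =>
    simp only [loopB, stepB]
    cases ms.findIdx? (fun m => PySem.Str.endswith f m) with
    | none => exact ih
    | some k => simpa using ih

-- if the head matcher has a match, B ends with key 0 on the first such file
theorem loopB_head_match (m : String) (rest : List String) (fs : List String)
    (best : Option (Nat × String))
    (hInv : ∀ k f, best = some (k, f) → 1 ≤ k)
    (f0 : String)
    (hfind : fs.find? (fun fp => PySem.Str.endswith fp m) = some f0) :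
    loopB (m :: rest) best fs = some (0, f0) := by
  induction fs generalizing best with
  | nil => simp at hfind
  | cons f fs ih =>
    by_cases hm : PySem.Str.endswith f m = true
    · have hf0 : f0 = f := by
        simp only [List.find?_cons, hm] at hfind
        exact (Option.some_inj.mp hfind).symm
      subst hf0
      have hstep : stepB (m :: rest) best f0 = some (0, f0) := by
        simp only [stepB, List.findIdx?_cons, hm]
        cases best with
        | none => rfl
        | some p =>
          obtain ⟨bk, bf⟩ := p
          have h1 : 1 ≤ bk := hInv bk bf rfl
          simp [Nat.lt_of_lt_of_le Nat.zero_lt_one h1]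
      simp only [loopB]
      rw [hstep]
      exact loopB_zero _ _ _
    · have hm' : PySem.Str.endswith f m = false := by simpa using hm
      simp only [List.find?_cons, hm'] at hfind
      refine ih _ ?_ hfind
      intro k g hk
      simp only [stepB, List.findIdx?_cons, hm'] at hk
      cases hidx : (rest.findIdx? (fun mm => PySem.Str.endswith f mm)) with
      | none =>
        rw [hidx] at hk; simp at hk; exact hInv k g hk
      | some j =>
        rw [hidx] at hk
        simp only [Option.map_some] at hk
        cases best with
        | none =>
          simp at hk; omega
        | some p =>
          obtain ⟨bk, bf⟩ := p
          by_cases hlt : j + 1 < bk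
          · simp [hlt] at hk; omega
          · simp [hlt] at hk
            exact hInv k g (by simp [hk])

def shiftB (o : Option (Nat × String)) : Option (Nat × String) :=
  o.map (fun p => (p.1 + 1, p.2))

-- if no file matches the head matcher, dropping it just shifts every key by one
theorem loopB_shift (m : String) (rest : List String) (fs : List String)
    (best : Option (Nat × String))
    (hno : ∀ f ∈ fs, PySem.Str.endswith f m = false) :
    loopB (m :: rest) (shiftB best) fs = shiftB (loopB rest best fs) := by
  induction fs generalizing best with
  | nil => rfl
  | cons f fs ih =>
    have hm : PySem.Str.endswith f m = false := hno f (List.mem_cons_self)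
    have hstep : stepB (m :: rest) (shiftB best) f = shiftB (stepB rest best f) := by
      simp only [stepB, List.findIdx?_cons, hm]
      cases hidx : (rest.findIdx? (fun mm => PySem.Str.endswith f mm)) with
      | none => simp
      | some k =>
        cases best with
        | none => simp [shiftB]
        | some p =>
          obtain ⟨bk, bf⟩ := p
          by_cases hlt : k < bk
          · simp [shiftB, hlt, Nat.add_lt_add_right hlt 1]
          · have : ¬ (k + 1 < bk + 1) := by omega
            simp [shiftB, hlt, this]
    simp only [loopB, hstep]
    exact ih _ (fun g hg => hno g (List.mem_cons_of_mem _ hg))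

def sndB (o : Option (Nat × String)) : Option String :=
  match o with
  | none => none
  | some (_, f) => some f

theorem loopA_eq_loopB (ms : List String) (fs : List String) :
    loopA fs ms = sndB (loopB ms none fs) := by
  induction ms generalizing fs with
  | nil =>
    have h : loopB ([] : List String) none fs = none := by
      induction fs with
      | nil => rfl
      | cons f fs ih => simpa [loopB, stepB] using ih
    simp [loopA, h, sndB]
  | cons m rest ih =>
    cases hfind : fs.find? (fun fp => PySem.Str.endswith fp m) with
    | some f0 =>
      have hB := loopB_head_match m rest fs none (by intro k f h; simp at h) f0 hfind
      simp only [loopA, sndB, hB]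
      rw [hfind]
    | none =>
      have hno : ∀ f ∈ fs, PySem.Str.endswith f m = false := by
        intro f hf
        have := List.find?_eq_none.mp hfind f hf
        simpa using this
      have hB : loopB (m :: rest) none fs = shiftB (loopB rest none fs) := by
        have := loopB_shift m rest fs none hno
        simpa [shiftB] using this
      simp only [loopA, hfind, ih, hB]
      cases loopB rest none fs with
      | none => rfl
      | some p => obtain ⟨k, f⟩ := p; rfl

-- ===== VERDICT (by name: the statement is the Claim_ definition above) =====
theorem find_model_file_spec : Claim_equal_find_model_file := by
  intro base_path all_files _
  unfold Spec_find_model_file find_model_file find_model_file_alt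
  rw [scanPatterns_eq_loopA]
  have h := loopA_eq_loopB pvMatchers all_files
  have hm : ([(".keras", ["model.keras", "saved_model.keras"]),
     (".h5", ["model.h5", "weights.h5"]),
     (".pb", ["saved_model.pb"])] : List (String × List String)).flatMap (fun p => p.2 ++ [p.1]) = pvMatchers := by rfl
  rw [hm, h]
  cases loopB pvMatchers none all_files with
  | none => rfl
  | some p => obtain ⟨k, f⟩ := p; rfl
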